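-- pv_equiv track=rewrite | github.com/gatech-genemark/StartLink-exp | sbsp/code/python/driver/test_random_seeds.py | lists_are_equal
-- ===== SOURCE A (Python) =====
-- def lists_are_equal(lists):
--     # type:(List[List[Any]]) -> bool
--
--     if len(lists) == 0:
--         return True
--
--     list_len = len(lists[0])
--
--     # check all same length
--     for i in range(1, len(lists)):
--         if len(lists[i]) != list_len:
--             return False
--
--     for j in range(list_len):
--         element = lists[0][j]
--
--         for i in range(1, len(lists)):
--             if lists[i][j] != element:
--                 return False
--
--     return True
-- ===== SOURCE B (Python) =====
-- def lists_are_equal(lists):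
--     # type:(List[List[Any]]) -> bool
--     return all(lst == lists[0] for lst in lists)
-- ===== Notes on version B (the rewrite author's own statement) =====
-- stated objective: simpler
-- what changed: Replaces A's separate length-check loop plus column-major nested index loops with a single row-wise pass comparing each list as a whole to the first via list equality.
import Mathlib
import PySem

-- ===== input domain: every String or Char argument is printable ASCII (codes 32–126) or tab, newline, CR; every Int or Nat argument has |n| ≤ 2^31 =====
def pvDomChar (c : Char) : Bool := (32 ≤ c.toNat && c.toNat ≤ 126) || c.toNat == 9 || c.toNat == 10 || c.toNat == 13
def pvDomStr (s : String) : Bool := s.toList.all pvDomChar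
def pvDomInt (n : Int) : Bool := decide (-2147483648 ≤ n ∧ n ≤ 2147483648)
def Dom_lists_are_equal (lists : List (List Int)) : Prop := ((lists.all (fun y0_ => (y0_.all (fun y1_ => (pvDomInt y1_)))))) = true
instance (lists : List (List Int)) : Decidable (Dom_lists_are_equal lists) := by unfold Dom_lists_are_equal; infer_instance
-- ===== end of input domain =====

-- B replaces A's length-check loop plus column-major nested index loops with one row-wise pass comparing each list to the first (simpler).

-- ===== PORT A =====
def lists_are_equal (lists : List (List Int)) : Bool :=
  match lists with
  | [] => true
  | l0 :: _ =>
    let listLen : Int := l0.length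
    if (PySem.List.pyRange 1 lists.length 1).any
        (fun i => !(((PySem.List.pyGetD lists i []).length : Int) == listLen)) then false
    else if (PySem.List.pyRange 0 listLen 1).any (fun j =>
        let element := PySem.List.pyGetD l0 j 0
        (PySem.List.pyRange 1 lists.length 1).any
          (fun i => !(PySem.List.pyGetD (PySem.List.pyGetD lists i []) j 0 == element))) then false
    else true

-- ===== PORT B =====
def lists_are_equal_alt (lists : List (List Int)) : Bool :=
  match lists with
  | [] => true
  | l0 :: _ => lists.all (fun lst => lst == l0)

-- ===== PRECONDITION & SPEC =====
def Spec_lists_are_equal (lists : List (List Int)) (out : Bool) : Prop := out = lists_are_equal_alt lists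
instance (lists : List (List Int)) (out : Bool) : Decidable (Spec_lists_are_equal lists out) := by unfold Spec_lists_are_equal; infer_instance

-- ===== CLAIM (what is proved, stated in full; the proofs are below) =====
def Claim_equal_lists_are_equal : Prop := ∀ (lists : List (List Int)), Dom_lists_are_equal lists → Spec_lists_are_equal lists (lists_are_equal lists)

-- ===== LEMMAS AND PROOFS =====

theorem lists_are_equal_cons (l0 : List Int) (rest : List (List Int)) :
    lists_are_equal (l0 :: rest) = rest.all (fun lst => lst == l0) := by
  have hmap : (PySem.List.pyRange 1 ((l0 :: rest).length : Int) 1).map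
      (fun i => PySem.List.pyGetD (l0 :: rest) i []) = rest := by
    simpa using PySem.List.map_pyGetD_pyRange' (xs := l0 :: rest) (a := 1) (d := []) (by norm_num)
  have hany : ∀ (q : List Int → Bool),
      (PySem.List.pyRange 1 ((l0 :: rest).length : Int) 1).any
        (fun i => q (PySem.List.pyGetD (l0 :: rest) i [])) = rest.any q := by
    intro q
    have h := congrArg (fun t => t.any q) hmap
    simp only [List.any_map] at h
    exact h
  have e1 : ((PySem.List.pyRange 1 ((l0 :: rest).length : Int) 1).any
      (fun i => !(((PySem.List.pyGetD (l0 :: rest) i []).length : Int) == (l0.length : Int))))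
      = rest.any (fun l => !((l.length : Int) == (l0.length : Int))) := hany (fun l => !((l.length : Int) == (l0.length : Int)))
  have e2 : (fun j => (PySem.List.pyRange 1 ((l0 :: rest).length : Int) 1).any
        (fun i => !(PySem.List.pyGetD (PySem.List.pyGetD (l0 :: rest) i []) j 0 == PySem.List.pyGetD l0 j 0)))
      = (fun j => rest.any (fun l => !(PySem.List.pyGetD l j 0 == PySem.List.pyGetD l0 j 0))) :=
    funext (fun j => hany (fun l => !(PySem.List.pyGetD l j 0 == PySem.List.pyGetD l0 j 0)))
  simp only [lists_are_equal]
  rw [e1, e2]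
  split_ifs with h1 h2
  · symm
    rw [List.all_eq_false]
    obtain ⟨l, hl, hq⟩ := List.any_eq_true.mp h1
    simp only [Bool.not_eq_eq_eq_not, Bool.not_true, beq_eq_false_iff_ne, ne_eq,
      Nat.cast_inj] at hq
    refine ⟨l, hl, ?_⟩
    simp only [beq_iff_eq]
    intro he
    exact hq (by rw [he])
  · symm
    rw [List.all_eq_false]
    simp at h1
    obtain ⟨j, hj, hx⟩ := List.any_eq_true.mp h2
    obtain ⟨l, hl, hq⟩ := List.any_eq_true.mp hx
    obtain ⟨hj0, hjlt⟩ := PySem.List.mem_pyRange_one.mp hj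
    simp only [Bool.not_eq_eq_eq_not, Bool.not_true, beq_eq_false_iff_ne, ne_eq] at hq
    refine ⟨l, hl, ?_⟩
    simp only [beq_iff_eq]
    intro he
    exact hq (by rw [he])
  · symm
    rw [List.all_eq_true]
    intro l hl
    simp at h1 h2
    have hlen : l.length = l0.length := h1 l hl
    simp only [beq_iff_eq]
    apply List.ext_getElem hlen
    intro k hk hk0
    have := h2 (k : Int) (by positivity) (by exact_mod_cast hk0) l hl
    rwa [PySem.List.pyGetD_natCast, PySem.List.pyGetD_natCast,
      List.getD_eq_getElem _ _ hk, List.getD_eq_getElem _ _ hk0] at this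

-- ===== VERDICT (by name: the statement is the Claim_ definition above) =====
theorem lists_are_equal_spec : Claim_equal_lists_are_equal := by
  intro lists _
  unfold Spec_lists_are_equal
  cases lists with
  | nil => rfl
  | cons l0 rest =>
    rw [lists_are_equal_cons]
    simp [lists_are_equal_alt]
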